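-- pv_equiv track=rewrite | github.com/wenyeguo/phishing_detection | baseline/feature_extraction.py | num_of_punctuation
-- ===== SOURCE A (Python) =====
-- from collections import Counter
--
-- def num_of_punctuation(X):
-- 	#  . ! # $ % &*,;:’
-- 	res = []
-- 	chars = set('.!#$%&*,;:’')
-- 	for i in range(len(X)):
-- 		item = X[i]
-- 		char_in_URL = Counter(item)
-- 		count = 0
-- 		for c in chars:
-- 			count += char_in_URL[c]
-- 		res.append(count)
-- 	return res
-- ===== SOURCE B (Python) =====
-- def num_of_punctuation(X):
--     chars = set('.!#$%&*,;:’')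
--     return [sum(1 for c in s if c in chars) for s in X]
-- ===== Notes on version B (the rewrite author's own statement) =====
-- stated objective: simpler
-- what changed: Replaces A's per-string Counter frequency table summed over the punctuation set with a single direct membership-counting pass over each string's characters (no table built, no loop over the char set).
import Mathlib
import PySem

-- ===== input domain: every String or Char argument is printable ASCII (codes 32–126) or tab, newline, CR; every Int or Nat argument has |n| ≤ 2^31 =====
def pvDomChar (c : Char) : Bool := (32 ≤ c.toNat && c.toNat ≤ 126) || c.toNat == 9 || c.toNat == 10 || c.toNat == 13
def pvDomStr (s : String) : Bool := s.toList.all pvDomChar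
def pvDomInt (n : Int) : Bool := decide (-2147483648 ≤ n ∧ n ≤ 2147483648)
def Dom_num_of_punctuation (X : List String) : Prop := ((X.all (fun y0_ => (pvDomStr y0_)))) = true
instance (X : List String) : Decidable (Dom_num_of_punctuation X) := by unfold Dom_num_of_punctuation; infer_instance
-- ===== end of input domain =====

-- B replaces A's per-string Counter-then-sum-over-the-char-set with one direct
-- membership-counting pass over each string's characters; return value only.

-- ===== PORT A =====
-- chars = set('.!#$%&*,;:’')
def pvChars : PySem.Set Char := PySem.Set.ofList ".!#$%&*,;:’".toList

def num_of_punctuation (X : List String) : List Int :=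
  (PySem.List.pyRange 0 (X.length : Int) 1).foldl
    (fun res i =>
      -- item = X[i]; char_in_URL = Counter(item); count = sum of char_in_URL[c] over chars
      res ++ [pvChars.foldl
        (fun count c => count + (PySem.Dict.counter (PySem.List.pyGetD X i "").toList).getD c 0)
        (0 : Int)]) []

-- ===== PORT B =====
-- chars = set('.!#$%&*,;:’'); [sum(1 for c in s if c in chars) for s in X]
def pvCharsB : PySem.Set Char := PySem.Set.ofList ".!#$%&*,;:’".toList

def num_of_punctuation_alt (X : List String) : List Int :=
  X.map (fun s => ((s.toList.countP (fun c => PySem.Set.contains pvCharsB c)) : Int))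

-- ===== PRECONDITION & SPEC =====
def Spec_num_of_punctuation (X : List String) (out : List Int) : Prop := out = num_of_punctuation_alt X
instance (X : List String) (out : List Int) : Decidable (Spec_num_of_punctuation X out) := by unfold Spec_num_of_punctuation; infer_instance

-- ===== CLAIM (what is proved, stated in full; the proofs are below) =====
def Claim_equal_num_of_punctuation : Prop := ∀ (X : List String), Dom_num_of_punctuation X → Spec_num_of_punctuation X (num_of_punctuation X)

-- ===== LEMMAS AND PROOFS =====

-- sum of an equality indicator over a nodup list is a membership indicator
theorem pv_indicator_sum (x : Char) (cs : List Char) (h : cs.Nodup) :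
    (cs.map (fun c => if x == c then (1:Int) else 0)).sum
      = if cs.contains x then 1 else 0 := by
  induction cs with
  | nil => simp
  | cons y cs ihc =>
    rcases List.nodup_cons.mp h with ⟨hy, hnd⟩
    by_cases hxy : x = y
    · subst hxy
      have h0 : (cs.map (fun c => if x == c then (1:Int) else 0)).sum = 0 := by
        rw [ihc hnd]; simp [List.contains_eq_mem, hy]
      simp only [List.map_cons, List.sum_cons, h0, List.contains_cons]
      simp
    · have hne : (x == y) = false := by simp [hxy]
      have hne2 : (y == x) = false := by simp [Ne.symm hxy]
      simp only [List.map_cons, List.sum_cons, List.contains_cons, ihc hnd, hne, hne2]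
      simp

-- sum over a nodup char list of per-char counts = one countP pass
theorem pv_sum_count (cs : List Char) (h : cs.Nodup) (l : List Char) :
    (cs.map (fun c => (l.count c : Int))).sum = (l.countP (fun c => cs.contains c) : Int) := by
  induction l with
  | nil => simp
  | cons x l ih =>
    simp only [List.count_cons, List.countP_cons]
    push_cast
    have hsplit : (cs.map (fun c => ((l.count c : Int) + if x == c then 1 else 0))).sum
        = (cs.map (fun c => (l.count c : Int))).sum
          + (cs.map (fun c => if x == c then (1:Int) else 0)).sum := by
      rw [← List.sum_map_add]
    rw [hsplit, ih]
    have hx : (cs.map (fun c => if x == c then (1:Int) else 0)).sum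
        = if cs.contains x then 1 else 0 := pv_indicator_sum x cs h
    rw [hx]

-- ===== VERDICT (by name: the statement is the Claim_ definition above) =====
theorem num_of_punctuation_spec : Claim_equal_num_of_punctuation := by
  intro X _
  unfold Spec_num_of_punctuation num_of_punctuation num_of_punctuation_alt
  rw [PySem.List.foldl_pyRange_pyGetD'
    (f := fun res item => res ++ [List.foldl
      (fun count c => count + (PySem.Dict.counter (String.toList item)).getD c 0) (0:Int) pvChars])
    (xs := X) (d := "") (init := []) (by omega)]
  simp only [Int.toNat_zero, List.drop_zero]
  rw [PySem.List.foldl_append_singleton_eq_map]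
  apply List.map_congr_left
  intro s _
  simp only [PySem.Dict.getD_counter]
  rw [PySem.List.foldl_add (g := fun c => (s.toList.count c : Int))]
  rw [pv_sum_count pvChars (by unfold pvChars; exact PySem.Set.nodup_ofList _) s.toList]
  simp [pvChars, pvCharsB]
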